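-- pv_equiv track=rewrite | github.com/ZrpChuang/steering | src/pre_exp_llava/gen_llava-v1.5-7b_20260104_004851/analyze_visual_sensitivity_Sfix_objclean_denoised.py | choose_merge_col_idx
-- ===== SOURCE A (Python) =====
-- from typing import List, Dict, Any, Tuple, Optional, Set
--
-- def choose_merge_col_idx(cols: List[str]) -> int:
--     # token_str 可能含逗号且没被正确 quote 时会炸行，这里尽量把 token_str 当 merge 目标列
--     text_keys = ["token_str", "token_piece", "tok_str", "piece", "text", "content"]
--     candidate_idxs = []
--     for i, c in enumerate(cols):
--         cl = c.lower()
--         if any(k in cl for k in text_keys):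
--             candidate_idxs.append(i)
--     if candidate_idxs:
--         return max(candidate_idxs)
--     return len(cols) - 1
-- ===== SOURCE B (Python) =====
-- def choose_merge_col_idx(cols):
--     text_keys = ["token_str", "token_piece", "tok_str", "piece", "text", "content"]
--     def hit(c):
--         cl = c.lower()
--         return any(k in cl for k in text_keys)
--     for i in range(len(cols) - 1, -1, -1):
--         if hit(cols[i]):
--             return i
--     return len(cols) - 1
-- ===== Notes on version B (the rewrite author's own statement) =====
-- stated objective: simpler
-- what changed: Replaces the accumulate-all-matching-indices list plus max() reduction with a short-circuiting backward scan that returns the first (i.e. highest) matching index immediately, eliminating the intermediate list.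
import Mathlib
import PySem

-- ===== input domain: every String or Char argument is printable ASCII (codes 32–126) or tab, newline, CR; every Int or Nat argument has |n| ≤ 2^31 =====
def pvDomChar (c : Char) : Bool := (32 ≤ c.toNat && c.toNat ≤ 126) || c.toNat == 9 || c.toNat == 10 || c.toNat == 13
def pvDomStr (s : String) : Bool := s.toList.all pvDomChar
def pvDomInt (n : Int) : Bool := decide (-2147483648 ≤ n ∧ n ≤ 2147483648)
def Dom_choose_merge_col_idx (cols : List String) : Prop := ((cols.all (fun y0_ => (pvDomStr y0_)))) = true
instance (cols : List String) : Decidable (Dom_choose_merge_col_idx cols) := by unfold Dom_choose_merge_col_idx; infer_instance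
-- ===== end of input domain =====

-- B replaces A's accumulate-then-max strategy with a short-circuiting backward scan (simpler; no intermediate list).


-- ===== PORT A =====
def pvTextKeys : List String :=
  ["token_str", "token_piece", "tok_str", "piece", "text", "content"]

-- 'any(k in cl for k in text_keys)' on cl = c.lower()
def pvHit (c : String) : Bool :=
  pvTextKeys.any (fun k => PySem.Str.isIn k (PySem.Str.lower c))

def choose_merge_col_idx (cols : List String) : Int :=
  -- candidate_idxs accumulated over enumerate(cols)
  let candidate_idxs :=
    (PySem.List.enumerate cols 0).foldl
      (fun acc p => if pvHit p.2 then acc ++ [p.1] else acc) []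
  -- 'if candidate_idxs: return max(candidate_idxs)'
  match PySem.List.max? candidate_idxs (fun x => x) with
  | some m => m
  | none => (cols.length : Int) - 1

-- ===== PORT B =====
-- 'for i in range(len(cols)-1, -1, -1): if hit(cols[i]): return i' ; d = value returned after the loop.
-- cols[i] is always in range here, so pyGetD with a dummy default is exact.
def pvRevScan (cols : List String) (d : Int) : Nat → Int
  | 0 => d
  | i + 1 => if pvHit (PySem.List.pyGetD cols (i : Int) "") then (i : Int) else pvRevScan cols d i

def choose_merge_col_idx_alt (cols : List String) : Int :=
  pvRevScan cols ((cols.length : Int) - 1) cols.length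

-- ===== PRECONDITION & SPEC =====
def Spec_choose_merge_col_idx (cols : List String) (out : Int) : Prop := out = choose_merge_col_idx_alt cols
instance (cols : List String) (out : Int) : Decidable (Spec_choose_merge_col_idx cols out) := by unfold Spec_choose_merge_col_idx; infer_instance

-- ===== CLAIM (what is proved, stated in full; the proofs are below) =====
def Claim_equal_choose_merge_col_idx : Prop := ∀ (cols : List String), Dom_choose_merge_col_idx cols → Spec_choose_merge_col_idx cols (choose_merge_col_idx cols)

-- ===== LEMMAS AND PROOFS =====

-- A's candidate list, in closed form (what the foldl builds).
def pvCand (cols : List String) : List Int :=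
  ((PySem.List.enumerate cols 0).filter (fun p => pvHit p.2)).map (·.1)

theorem pvCand_append (cols : List String) (c : String) :
    pvCand (cols ++ [c]) =
      pvCand cols ++ (if pvHit c then [(cols.length : Int)] else []) := by
  by_cases h : pvHit c <;>
    simp [pvCand, PySem.List.enumerate_append, PySem.List.enumerate_cons, List.filter_append, h]

theorem pvCand_lt (cols : List String) : ∀ x ∈ pvCand cols, x < (cols.length : Int) := by
  intro x hx
  simp only [pvCand, List.mem_map] at hx
  obtain ⟨p, hp, rfl⟩ := hx
  have hmem : p ∈ PySem.List.enumerate cols 0 := (List.mem_filter.mp hp).1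
  have : p.1 ∈ (PySem.List.enumerate cols 0).map (·.1) := List.mem_map_of_mem hmem
  rw [PySem.List.map_fst_enumerate] at this
  have := (PySem.List.mem_pyRange_one.mp this).2
  omega

theorem pvRevScan_append (cols : List String) (c : String) (d : Int) :
    ∀ i : Nat, i ≤ cols.length → pvRevScan (cols ++ [c]) d i = pvRevScan cols d i := by
  intro i
  induction i with
  | zero => intro _; rfl
  | succ i ih =>
    intro h
    have hi : i < cols.length := by omega
    have hg : PySem.List.pyGetD (cols ++ [c]) (i : Int) "" = PySem.List.pyGetD cols (i : Int) "" := by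
      simp [PySem.List.pyGetD_natCast, List.getD, List.getElem?_append_left hi]
    simp only [pvRevScan, hg, ih (by omega)]

theorem pvMain (cols : List String) (d : Int) :
    (match PySem.List.max? (pvCand cols) (fun x => x) with
      | some m => m
      | none => d) = pvRevScan cols d cols.length := by
  induction cols using List.reverseRecOn with
  | nil =>
    have h0 : PySem.List.max? (pvCand ([] : List String)) (fun x : Int => x) = none := by
      cases h : PySem.List.max? (pvCand ([] : List String)) (fun x : Int => x) with
      | none => rfl
      | some m => exact absurd (PySem.List.max?_mem h) (by simp [pvCand])
    rw [h0]
    rfl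
  | append_singleton xs c ih =>
    have hlen : (xs ++ [c]).length = xs.length + 1 := by simp
    have hget : PySem.List.pyGetD (xs ++ [c]) ((xs.length : Nat) : Int) "" = c := by
      simp [PySem.List.pyGetD_natCast, List.getD]
    rw [pvCand_append, hlen]
    by_cases hc : pvHit c
    · -- the last element is the new maximum; B returns it immediately
      cases hl : pvCand xs with
      | nil =>
        simp [hc, PySem.List.max?_id_cons, pvRevScan, hget]
      | cons x t =>
        have hmax : PySem.List.max? (x :: t) (fun x => x) = some (t.foldl max x) :=
          PySem.List.max?_id_cons x t
        have hm := PySem.List.max?_mem hmax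
        have hlt : t.foldl max x < (xs.length : Int) := pvCand_lt xs _ (hl ▸ hm)
        simp only [hc, if_true, List.cons_append, PySem.List.max?_id_cons,
          List.foldl_append, List.foldl_cons, List.foldl_nil, pvRevScan, hget, if_true]
        simp [max_eq_right hlt.le]
    · -- no new candidate; B skips index xs.length and the scan restricts to xs
      rw [if_neg hc, List.append_nil]
      show _ = pvRevScan (xs ++ [c]) d (xs.length + 1)
      simp only [pvRevScan, hget, hc]
      rw [if_neg (by simp), pvRevScan_append xs c d xs.length (le_refl _)]
      exact ih

-- ===== VERDICT (by name: the statement is the Claim_ definition above) =====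
theorem choose_merge_col_idx_spec : Claim_equal_choose_merge_col_idx := by
  intro cols _
  unfold Spec_choose_merge_col_idx choose_merge_col_idx choose_merge_col_idx_alt
  simp only [PySem.List.foldl_append_if]
  simpa [pvCand] using pvMain cols ((cols.length : Int) - 1)
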